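-- pv_equiv track=rewrite | github.com/pyccel/GeLaTo | gelato/fem/matrix.py | print_bilinear_accumulation_assign
-- ===== SOURCE A (Python) =====
-- def print_bilinear_accumulation_assign(n_rows, n_cols, dim, tab):
--     if dim == 1:
--         e_pattern = 'mat_{i}{j}[il_1, test_p1 + jl_1 - il_1] = v_{i}{j}'
--
--     elif dim == 2:
--         e_pattern = 'mat_{i}{j}[il_1, il_2, test_p1 + jl_1 - il_1, test_p2 + jl_2 - il_2] = v_{i}{j}'
--
--     elif dim ==3:
--         e_pattern = 'mat_{i}{j}[il_1, il_2, il_3, test_p1 + jl_1 - il_1, test_p2 + jl_2 - il_2, test_p3 + jl_3 - il_3] = v_{i}{j}'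
--
--     else:
--         raise NotImplementedError('only 1d, 2d and 3d are available')
--
--     lines = []
--     for i in range(0, n_rows):
--         for j in range(0, n_cols):
--             line = e_pattern.format(i=i,j=j)
--             line = tab + line
--
--             lines.append(line)
--
--     accum_assign_str = '\n'.join(line for line in lines)
--     return accum_assign_str
-- ===== SOURCE B (Python) =====
-- def print_bilinear_accumulation_assign(n_rows, n_cols, dim, tab):
--     if dim not in (1, 2, 3):
--         raise NotImplementedError('only 1d, 2d and 3d are available')
--     parts = ['il_%d' % k for k in range(1, dim + 1)]
--     parts += ['test_p%d + jl_%d - il_%d' % (k, k, k) for k in range(1, dim + 1)]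
--     idx = ', '.join(parts)
--     if n_rows <= 0 or n_cols <= 0:
--         return ''
--     out = []
--     for k in range(n_rows * n_cols):
--         i, j = divmod(k, n_cols)
--         ij = str(i) + str(j)
--         out.append(tab + 'mat_' + ij + '[' + idx + '] = v_' + ij)
--     return '\n'.join(out)
-- ===== Notes on version B (the rewrite author's own statement) =====
-- stated objective: alternative
-- what changed: B replaces A's three hardcoded format templates and nested i,j loops by a per-dimension joined index string and ONE flat loop over range(n_rows*n_cols) that recovers (i,j) with divmod and builds each line by direct string concatenation instead of str.format.
import Mathlib
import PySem

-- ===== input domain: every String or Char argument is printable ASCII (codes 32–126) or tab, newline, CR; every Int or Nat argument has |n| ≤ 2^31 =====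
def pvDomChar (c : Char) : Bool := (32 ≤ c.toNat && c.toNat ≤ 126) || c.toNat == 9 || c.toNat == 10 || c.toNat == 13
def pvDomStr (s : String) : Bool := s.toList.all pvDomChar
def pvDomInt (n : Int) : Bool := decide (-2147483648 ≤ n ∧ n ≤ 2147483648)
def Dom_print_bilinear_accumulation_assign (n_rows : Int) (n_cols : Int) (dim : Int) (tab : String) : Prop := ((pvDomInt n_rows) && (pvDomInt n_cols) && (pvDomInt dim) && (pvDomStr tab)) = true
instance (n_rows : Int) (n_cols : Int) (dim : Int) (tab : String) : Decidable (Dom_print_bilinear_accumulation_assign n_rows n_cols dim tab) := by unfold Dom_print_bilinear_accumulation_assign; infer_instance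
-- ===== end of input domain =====

-- B replaces A's three hardcoded templates and nested i,j loops by a joined per-dimension
-- index string and ONE flat loop over range(n_rows*n_cols) with divmod, building each line
-- by direct concatenation instead of str.format (objective: alternative decomposition).

-- ===== PORT A =====
-- e_pattern.format(i=i, j=j): one left-to-right scan of the template replacing each
-- '{i}'/'{j}' placeholder with str(i)/str(j) — exact for these templates (no other braces).
def pvFmtChars : List Char → List Char → List Char → List Char
  | '{' :: 'i' :: '}' :: rest, si, sj => si ++ pvFmtChars rest si sj
  | '{' :: 'j' :: '}' :: rest, si, sj => sj ++ pvFmtChars rest si sj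
  | c :: rest, si, sj => c :: pvFmtChars rest si sj
  | [], _, _ => []

def pvFormatIJ (pat : String) (i j : Int) : String :=
  String.ofList (pvFmtChars pat.toList (PySem.Int.toStr i).toList (PySem.Int.toStr j).toList)

def print_bilinear_accumulation_assign (n_rows : Int) (n_cols : Int) (dim : Int) (tab : String) : String :=
  let e_pattern : String :=
    if dim = 1 then "mat_{i}{j}[il_1, test_p1 + jl_1 - il_1] = v_{i}{j}"
    else if dim = 2 then "mat_{i}{j}[il_1, il_2, test_p1 + jl_1 - il_1, test_p2 + jl_2 - il_2] = v_{i}{j}"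
    else if dim = 3 then "mat_{i}{j}[il_1, il_2, il_3, test_p1 + jl_1 - il_1, test_p2 + jl_2 - il_2, test_p3 + jl_3 - il_3] = v_{i}{j}"
    else ""  -- Python raises NotImplementedError here; excluded by Pre_
  let lines : List String :=
    (PySem.List.pyRange 0 n_rows 1).foldl (fun acc i =>
      (PySem.List.pyRange 0 n_cols 1).foldl (fun acc j =>
        acc ++ [tab ++ pvFormatIJ e_pattern i j]) acc) []
  PySem.Str.join "\n" lines

-- ===== PORT B =====
def print_bilinear_accumulation_assign_alt (n_rows : Int) (n_cols : Int) (dim : Int) (tab : String) : String :=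
  if dim ≠ 1 ∧ dim ≠ 2 ∧ dim ≠ 3 then ""  -- Python B raises NotImplementedError here; excluded by Pre_
  else
    let ks := PySem.List.pyRange 1 (dim + 1) 1
    let parts := ks.map (fun k => "il_" ++ PySem.Int.toStr k)
        ++ ks.map (fun k => "test_p" ++ PySem.Int.toStr k ++ " + jl_" ++ PySem.Int.toStr k ++ " - il_" ++ PySem.Int.toStr k)
    let idx := PySem.Str.join ", " parts
    if n_rows ≤ 0 ∨ n_cols ≤ 0 then ""
    else
      let out := (PySem.List.pyRange 0 (n_rows * n_cols) 1).foldl (fun acc k =>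
        let i := PySem.Int.floordiv k n_cols
        let j := PySem.Int.mod k n_cols
        let ij := PySem.Int.toStr i ++ PySem.Int.toStr j
        acc ++ [tab ++ "mat_" ++ ij ++ "[" ++ idx ++ "] = v_" ++ ij]) []
      PySem.Str.join "\n" out

-- ===== PRECONDITION & SPEC =====
-- Pre_ excludes exactly dim ∉ {1,2,3}, where both Pythons raise NotImplementedError.
def Pre_print_bilinear_accumulation_assign (n_rows : Int) (n_cols : Int) (dim : Int) (tab : String) : Prop :=
  dim = 1 ∨ dim = 2 ∨ dim = 3
instance (n_rows : Int) (n_cols : Int) (dim : Int) (tab : String) : Decidable (Pre_print_bilinear_accumulation_assign n_rows n_cols dim tab) := by unfold Pre_print_bilinear_accumulation_assign; infer_instance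

def pvWitness_print_bilinear_accumulation_assign : Int × Int × Int × String := (2, 2, 2, "    ")

def Spec_print_bilinear_accumulation_assign (n_rows : Int) (n_cols : Int) (dim : Int) (tab : String) (out : String) : Prop := out = print_bilinear_accumulation_assign_alt n_rows n_cols dim tab
instance (n_rows : Int) (n_cols : Int) (dim : Int) (tab : String) (out : String) : Decidable (Spec_print_bilinear_accumulation_assign n_rows n_cols dim tab out) := by unfold Spec_print_bilinear_accumulation_assign; infer_instance

-- ===== CLAIM (what is proved, stated in full; the proofs are below) =====
def Claim_equal_print_bilinear_accumulation_assign : Prop := ∀ (n_rows : Int) (n_cols : Int) (dim : Int) (tab : String), Dom_print_bilinear_accumulation_assign n_rows n_cols dim tab → Pre_print_bilinear_accumulation_assign n_rows n_cols dim tab → Spec_print_bilinear_accumulation_assign n_rows n_cols dim tab (print_bilinear_accumulation_assign n_rows n_cols dim tab)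

-- ===== LEMMAS AND PROOFS =====

-- row-major enumeration: nested ranges vs a flat range with div/mod (Nat form)
theorem pv_prod_range_eq {α : Type} (L : Nat → Nat → α) (r c : Nat) :
    (List.range r).flatMap (fun i => (List.range c).map (fun j => L i j))
      = (List.range (r * c)).map (fun k => L (k / c) (k % c)) := by
  induction r with
  | zero => simp
  | succ r ih =>
      rw [List.range_succ, List.flatMap_append, ih, Nat.succ_mul, List.range_add,
          List.map_append, List.map_map]
      simp only [List.flatMap_cons, List.flatMap_nil, List.append_nil]
      congr 1
      apply List.map_congr_left
      intro j hj
      rw [List.mem_range] at hj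
      have hc : 0 < c := Nat.pos_of_ne_zero (by omega)
      simp only [Function.comp]
      congr 1
      · rw [Nat.mul_comm r c, Nat.mul_add_div hc, Nat.div_eq_of_lt hj]
        omega
      · rw [Nat.mul_comm r c, Nat.mul_add_mod, Nat.mod_eq_of_lt hj]

-- the formatted template line equals B's concatenated line, per admitted dim
theorem pv_line_1 (tab : String) (i j : Int) :
    tab ++ pvFormatIJ "mat_{i}{j}[il_1, test_p1 + jl_1 - il_1] = v_{i}{j}" i j
      = tab ++ "mat_" ++ (PySem.Int.toStr i ++ PySem.Int.toStr j) ++ "[" ++ "il_1, test_p1 + jl_1 - il_1" ++ "] = v_" ++ (PySem.Int.toStr i ++ PySem.Int.toStr j) := by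
  apply String.toList_injective; simp [pvFormatIJ, pvFmtChars]

theorem pv_line_2 (tab : String) (i j : Int) :
    tab ++ pvFormatIJ "mat_{i}{j}[il_1, il_2, test_p1 + jl_1 - il_1, test_p2 + jl_2 - il_2] = v_{i}{j}" i j
      = tab ++ "mat_" ++ (PySem.Int.toStr i ++ PySem.Int.toStr j) ++ "[" ++ "il_1, il_2, test_p1 + jl_1 - il_1, test_p2 + jl_2 - il_2" ++ "] = v_" ++ (PySem.Int.toStr i ++ PySem.Int.toStr j) := by
  apply String.toList_injective; simp [pvFormatIJ, pvFmtChars]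

theorem pv_line_3 (tab : String) (i j : Int) :
    tab ++ pvFormatIJ "mat_{i}{j}[il_1, il_2, il_3, test_p1 + jl_1 - il_1, test_p2 + jl_2 - il_2, test_p3 + jl_3 - il_3] = v_{i}{j}" i j
      = tab ++ "mat_" ++ (PySem.Int.toStr i ++ PySem.Int.toStr j) ++ "[" ++ "il_1, il_2, il_3, test_p1 + jl_1 - il_1, test_p2 + jl_2 - il_2, test_p3 + jl_3 - il_3" ++ "] = v_" ++ (PySem.Int.toStr i ++ PySem.Int.toStr j) := by
  apply String.toList_injective; simp [pvFormatIJ, pvFmtChars]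

-- generic core: A's nested loop over a template equals B's flat divmod loop, for any
-- template/idx pair whose formatted lines agree pointwise
theorem pv_core (r c : Int) (tab pat idx : String)
    (hline : ∀ i j : Int, tab ++ pvFormatIJ pat i j
      = tab ++ "mat_" ++ (PySem.Int.toStr i ++ PySem.Int.toStr j) ++ "[" ++ idx ++ "] = v_" ++ (PySem.Int.toStr i ++ PySem.Int.toStr j)) :
    PySem.Str.join "\n"
      ((PySem.List.pyRange 0 r 1).foldl (fun acc i =>
        (PySem.List.pyRange 0 c 1).foldl (fun acc j =>
          acc ++ [tab ++ pvFormatIJ pat i j]) acc) [])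
    = (if r ≤ 0 ∨ c ≤ 0 then ""
       else PySem.Str.join "\n"
        ((PySem.List.pyRange 0 (r * c) 1).foldl (fun acc k =>
          acc ++ [tab ++ "mat_" ++ (PySem.Int.toStr (PySem.Int.floordiv k c) ++ PySem.Int.toStr (PySem.Int.mod k c)) ++ "[" ++ idx ++ "] = v_" ++ (PySem.Int.toStr (PySem.Int.floordiv k c) ++ PySem.Int.toStr (PySem.Int.mod k c))]) [])) := by
  simp only [PySem.List.foldl_append_singleton_eq_map, PySem.List.foldl_append_eq_flatMap,
    List.nil_append]
  by_cases h : r ≤ 0 ∨ c ≤ 0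
  · rw [if_pos h]
    rcases h with h | h
    · rw [PySem.List.pyRange_one_eq_nil h]; rfl
    · rw [PySem.List.pyRange_one_eq_nil (a := 0) (b := c) h]
      simp [PySem.Str.join, List.flatMap]
  · rw [if_neg h]
    have hr : 0 < r := by omega
    have hc : 0 < c := by omega
    congr 1
    have hcc : ((c.toNat : Int)) = c := Int.toNat_of_nonneg hc.le
    have hrc : (r * c).toNat = r.toNat * c.toNat := Int.toNat_mul hr.le hc.le
    rw [PySem.List.pyRange_one 0 r, PySem.List.pyRange_one 0 c,
        PySem.List.pyRange_one 0 (r * c)]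
    simp only [zero_add, Int.sub_zero, hrc, List.flatMap_map, List.map_map, Function.comp_def]
    rw [pv_prod_range_eq (fun i j => tab ++ pvFormatIJ pat (↑i) (↑j)) r.toNat c.toNat]
    apply List.map_congr_left
    intro k hk
    rw [hline]
    have h1 : PySem.Int.floordiv (k : Int) c = ((k / c.toNat : Nat) : Int) := by
      rw [← hcc]; exact PySem.Int.floordiv_natCast k c.toNat
    have h2 : PySem.Int.mod (k : Int) c = ((k % c.toNat : Nat) : Int) := by
      rw [← hcc]; exact PySem.Int.mod_natCast k c.toNat
    rw [h1, h2]

-- B's joined index string evaluates, per admitted dim, to the index part of A's template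
theorem pv_idx_1 : PySem.Str.join ", " ((PySem.List.pyRange 1 (1 + 1) 1).map (fun k => "il_" ++ PySem.Int.toStr k) ++ (PySem.List.pyRange 1 (1 + 1) 1).map (fun k => "test_p" ++ PySem.Int.toStr k ++ " + jl_" ++ PySem.Int.toStr k ++ " - il_" ++ PySem.Int.toStr k)) = "il_1, test_p1 + jl_1 - il_1" := by decide

theorem pv_idx_2 : PySem.Str.join ", " ((PySem.List.pyRange 1 (2 + 1) 1).map (fun k => "il_" ++ PySem.Int.toStr k) ++ (PySem.List.pyRange 1 (2 + 1) 1).map (fun k => "test_p" ++ PySem.Int.toStr k ++ " + jl_" ++ PySem.Int.toStr k ++ " - il_" ++ PySem.Int.toStr k)) = "il_1, il_2, test_p1 + jl_1 - il_1, test_p2 + jl_2 - il_2" := by decide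

theorem pv_idx_3 : PySem.Str.join ", " ((PySem.List.pyRange 1 (3 + 1) 1).map (fun k => "il_" ++ PySem.Int.toStr k) ++ (PySem.List.pyRange 1 (3 + 1) 1).map (fun k => "test_p" ++ PySem.Int.toStr k ++ " + jl_" ++ PySem.Int.toStr k ++ " - il_" ++ PySem.Int.toStr k)) = "il_1, il_2, il_3, test_p1 + jl_1 - il_1, test_p2 + jl_2 - il_2, test_p3 + jl_3 - il_3" := by decide

-- verdict proof
theorem print_bilinear_accumulation_assign_spec : Claim_equal_print_bilinear_accumulation_assign := by
  intro r c d tab _ hpre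
  unfold Spec_print_bilinear_accumulation_assign
  unfold print_bilinear_accumulation_assign print_bilinear_accumulation_assign_alt
  rcases hpre with h | h | h <;> subst h <;> simp only [reduceIte]
  · rw [pv_idx_1]; exact pv_core r c tab _ _ (pv_line_1 tab)
  · rw [pv_idx_2]; exact pv_core r c tab _ _ (pv_line_2 tab)
  · rw [pv_idx_3]; exact pv_core r c tab _ _ (pv_line_3 tab)
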